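-- pv_equiv track=rewrite | github.com/oliverJuhasz/Code-Challanges | CodeWars/6-Number_of_measurements.py | how_many_measurements
-- ===== SOURCE A (Python) =====
-- def how_many_measurements(coin):
--     measurements = 1
--     if coin == 1:
--         return 0
--     elif coin < 4:
--         return 1
--     else:
--         if int(coin / 3) % 2 == 0:
--             measurements += how_many_measurements(int(coin / 3))
--         elif int(coin / 3) % 2 != 0:
--             measurements += how_many_measurements(int(coin / 3 + 1))
--     return measurements
-- ===== SOURCE B (Python) =====
-- def how_many_measurements(coin):
--     count = 0
--     while coin >= 4:
--         q = int(coin / 3)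
--         coin = q if q % 2 == 0 else int(coin / 3 + 1)
--         count += 1
--     return count if coin == 1 else count + 1
-- ===== Notes on version B (the rewrite author's own statement) =====
-- stated objective: alternative
-- what changed: Replaced the self-recursive divide-by-3 function with an iterative while-loop that carries an explicit measurement counter and applies the base-case accounting after the loop.
import Mathlib
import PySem

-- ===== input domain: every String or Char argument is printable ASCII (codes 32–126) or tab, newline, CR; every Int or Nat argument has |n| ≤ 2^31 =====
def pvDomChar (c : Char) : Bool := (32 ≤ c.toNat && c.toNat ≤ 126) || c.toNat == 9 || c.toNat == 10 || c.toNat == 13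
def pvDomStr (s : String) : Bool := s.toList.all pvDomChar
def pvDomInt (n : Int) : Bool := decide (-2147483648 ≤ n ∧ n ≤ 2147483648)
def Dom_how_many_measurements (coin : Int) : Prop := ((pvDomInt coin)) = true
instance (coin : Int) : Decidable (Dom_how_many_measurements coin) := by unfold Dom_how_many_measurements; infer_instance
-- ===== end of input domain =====

-- B replaces A's recursion by an iterative loop with a step counter (same cost; objective: alternative decomposition).
-- ===== PORT A =====
-- int(coin/3) truncates toward zero; exact as Int.tdiv within Dom (|coin| ≤ 2^31, so coin/3 is float-exact enough),
-- and int(coin/3 + 1) = coin.tdiv 3 + 1 (only reached for coin ≥ 4).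
theorem pv_tdiv3_lt (coin : Int) (h : 4 ≤ coin) :
    1 ≤ coin.tdiv 3 ∧ coin.tdiv 3 + 1 < coin := by
  rw [Int.tdiv_eq_ediv_of_nonneg (by omega)]; omega

def how_many_measurements (coin : Int) : Int :=
  if coin = 1 then 0
  else if coin < 4 then 1
  else if (coin.tdiv 3) % 2 = 0 then 1 + how_many_measurements (coin.tdiv 3)
  else 1 + how_many_measurements (coin.tdiv 3 + 1)
termination_by coin.toNat
decreasing_by
  · have := pv_tdiv3_lt coin (by omega); omega
  · have := pv_tdiv3_lt coin (by omega); omega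

-- ===== PORT B =====
-- the while-loop of Source B: state (coin, count); int(coin/3) / int(coin/3+1) as in port A
def hmmLoop (coin : Int) (count : Int) : Int :=
  if 4 ≤ coin then
    hmmLoop (if (coin.tdiv 3) % 2 = 0 then coin.tdiv 3 else coin.tdiv 3 + 1) (count + 1)
  else if coin = 1 then count else count + 1
termination_by coin.toNat
decreasing_by
  have := pv_tdiv3_lt coin (by omega); split <;> omega

def how_many_measurements_alt (coin : Int) : Int := hmmLoop coin 0

-- ===== PRECONDITION & SPEC =====
def Spec_how_many_measurements (coin : Int) (out : Int) : Prop := out = how_many_measurements_alt coin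
instance (coin : Int) (out : Int) : Decidable (Spec_how_many_measurements coin out) := by unfold Spec_how_many_measurements; infer_instance

-- ===== CLAIM (what is proved, stated in full; the proofs are below) =====
def Claim_equal_how_many_measurements : Prop := ∀ (coin : Int), Dom_how_many_measurements coin → Spec_how_many_measurements coin (how_many_measurements coin)

-- ===== LEMMAS AND PROOFS =====

-- ===== VERDICT (by name: the statement is the Claim_ definition above) =====
theorem hmmLoop_eq (n : Nat) : ∀ (coin count : Int), coin.toNat ≤ n →
    hmmLoop coin count = count + how_many_measurements coin := by
  induction n with
  | zero =>
    intro coin count h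
    have h4 : ¬ 4 ≤ coin := by omega
    have h1 : coin ≠ 1 := by omega
    rw [hmmLoop, how_many_measurements]
    simp [h4, h1, show coin < 4 by omega]
  | succ n ih =>
    intro coin count h
    rw [hmmLoop, how_many_measurements]
    by_cases h4 : 4 ≤ coin
    · have hb := pv_tdiv3_lt coin h4
      simp only [h4, if_true, show ¬ (coin = 1) by omega, if_false,
        show ¬ (coin < 4) by omega, if_false]
      by_cases hp : (coin.tdiv 3) % 2 = 0
      · simp only [hp, if_true]
        rw [ih _ _ (by omega)]; ring
      · simp only [hp, if_false]
        rw [ih _ _ (by omega)]; ring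
    · by_cases h1 : coin = 1
      · simp [h1]
      · simp [h4, h1, show coin < 4 by omega]

theorem how_many_measurements_spec : Claim_equal_how_many_measurements := by
  intro coin _
  unfold Spec_how_many_measurements how_many_measurements_alt
  rw [hmmLoop_eq coin.toNat coin 0 le_rfl, zero_add]
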